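-- pv_equiv track=rewrite | github.com/danilo-dessi/toxicity | src/generate_balanced_all_toxic_levels.py | labels2vec
-- ===== SOURCE A (Python) =====
-- toxicity_labels = ['toxic', 'severe_toxic', 'obscene', 'threat', 'insult', 'identity_hate']
--
-- def labels2vec(labels):
-- 	vec = []
-- 	for t in toxicity_labels:
-- 		if t in labels:
-- 			vec += [1]
-- 		else:
-- 			vec += [0]
-- 	return vec
-- ===== SOURCE B (Python) =====
-- toxicity_labels = ['toxic', 'severe_toxic', 'obscene', 'threat', 'insult', 'identity_hate']
--
-- def labels2vec(labels):
--     idx = {t: i for i, t in enumerate(toxicity_labels)}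
--     vec = [0] * len(toxicity_labels)
--     for l in labels:
--         if l in idx:
--             vec[idx[l]] = 1
--     return vec
-- ===== Notes on version B (the rewrite author's own statement) =====
-- stated objective: idiomatic
-- what changed: B inverts the driving loop: instead of scanning the input list once per fixed label (6 membership scans), it precomputes a label->index table, starts from a zero vector and makes one pass over the input labels, marking vec[idx[l]] = 1 for each recognized label.
import Mathlib
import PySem

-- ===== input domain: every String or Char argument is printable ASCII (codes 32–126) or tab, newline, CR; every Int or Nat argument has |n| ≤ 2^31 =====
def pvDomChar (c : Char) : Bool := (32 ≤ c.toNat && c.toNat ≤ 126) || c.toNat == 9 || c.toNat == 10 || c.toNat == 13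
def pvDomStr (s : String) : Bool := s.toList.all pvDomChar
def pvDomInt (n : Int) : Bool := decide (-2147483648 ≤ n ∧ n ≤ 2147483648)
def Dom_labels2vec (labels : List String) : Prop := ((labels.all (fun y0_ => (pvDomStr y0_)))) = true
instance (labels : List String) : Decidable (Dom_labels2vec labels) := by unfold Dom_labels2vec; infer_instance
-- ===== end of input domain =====

-- B replaces A's six membership scans over the input with one pass over the input and a
-- precomputed label->index table (idiomatic inversion of the driving loop); return values identical.

-- ===== PORT A =====
def toxicityLabels : List String :=
  ["toxic", "severe_toxic", "obscene", "threat", "insult", "identity_hate"]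

-- A: for t in toxicity_labels: vec += [1] if t in labels else [0]
def labels2vec (labels : List String) : List Int :=
  toxicityLabels.foldl (fun vec t => if labels.contains t then vec ++ [1] else vec ++ [0]) []

-- ===== PORT B =====
-- idx = {t: i for i, t in enumerate(toxicity_labels)}
def pvIdxB : PySem.Dict String Int :=
  (PySem.List.enumerate toxicityLabels 0).foldl (fun d p => d.insert p.2 p.1) PySem.Dict.empty

-- vec[idx[l]] = 1, guarded by 'l in idx'; the stored indices are 0..5, all in range and
-- nonnegative, so List.set i.toNat is exact for vec[i] = 1 here.
def pvMarkB (vec : List Int) (l : String) : List Int :=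
  match pvIdxB.get? l with
  | some i => vec.set i.toNat 1
  | none => vec

def labels2vec_alt (labels : List String) : List Int :=
  labels.foldl pvMarkB (List.replicate toxicityLabels.length 0)

-- ===== PRECONDITION & SPEC =====
def Spec_labels2vec (labels : List String) (out : List Int) : Prop := out = labels2vec_alt labels
instance (labels : List String) (out : List Int) : Decidable (Spec_labels2vec labels out) := by unfold Spec_labels2vec; infer_instance

-- ===== CLAIM (what is proved, stated in full; the proofs are below) =====
def Claim_equal_labels2vec : Prop := ∀ (labels : List String), Dom_labels2vec labels → Spec_labels2vec labels (labels2vec labels)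

-- ===== LEMMAS AND PROOFS =====

lemma pvIdxB_eq : pvIdxB = PySem.Dict.mk
    [("toxic", 0), ("severe_toxic", 1), ("obscene", 2), ("threat", 3),
     ("insult", 4), ("identity_hate", 5)] := by decide

lemma pvGet_toxic : pvIdxB.get? "toxic" = some 0 := by decide
lemma pvGet_severe : pvIdxB.get? "severe_toxic" = some 1 := by decide
lemma pvGet_obscene : pvIdxB.get? "obscene" = some 2 := by decide
lemma pvGet_threat : pvIdxB.get? "threat" = some 3 := by decide
lemma pvGet_insult : pvIdxB.get? "insult" = some 4 := by decide
lemma pvGet_idh : pvIdxB.get? "identity_hate" = some 5 := by decide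

lemma pvGet_other (l : String) (h1 : l ≠ "toxic") (h2 : l ≠ "severe_toxic")
    (h3 : l ≠ "obscene") (h4 : l ≠ "threat") (h5 : l ≠ "insult")
    (h6 : l ≠ "identity_hate") : pvIdxB.get? l = none := by
  rw [pvIdxB_eq]
  simp [PySem.Dict.get?,
        Ne.symm h1, Ne.symm h2, Ne.symm h3, Ne.symm h4, Ne.symm h5, Ne.symm h6]

lemma pvFold_mark (ls : List String) : ∀ (a b c d e f : Int),
    ls.foldl pvMarkB [a, b, c, d, e, f] =
      [if ls.contains "toxic" then 1 else a,
       if ls.contains "severe_toxic" then 1 else b,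
       if ls.contains "obscene" then 1 else c,
       if ls.contains "threat" then 1 else d,
       if ls.contains "insult" then 1 else e,
       if ls.contains "identity_hate" then 1 else f] := by
  induction ls with
  | nil => intro a b c d e f; simp
  | cons l ls ih =>
    intro a b c d e f
    by_cases h1 : l = "toxic"
    · subst h1; simp [List.foldl_cons, pvMarkB, pvGet_toxic, ih]
    · by_cases h2 : l = "severe_toxic"
      · subst h2; simp [List.foldl_cons, pvMarkB, pvGet_severe, ih]
      · by_cases h3 : l = "obscene"
        · subst h3; simp [List.foldl_cons, pvMarkB, pvGet_obscene, ih]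
        · by_cases h4 : l = "threat"
          · subst h4; simp [List.foldl_cons, pvMarkB, pvGet_threat, ih]
          · by_cases h5 : l = "insult"
            · subst h5; simp [List.foldl_cons, pvMarkB, pvGet_insult, ih]
            · by_cases h6 : l = "identity_hate"
              · subst h6; simp [List.foldl_cons, pvMarkB, pvGet_idh, ih]
              · simp [List.foldl_cons, pvMarkB, pvGet_other l h1 h2 h3 h4 h5 h6, ih,
                      Ne.symm h1, Ne.symm h2, Ne.symm h3, Ne.symm h4, Ne.symm h5, Ne.symm h6]

-- ===== VERDICT (by name: the statement is the Claim_ definition above) =====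
theorem labels2vec_spec : Claim_equal_labels2vec := by
  intro labels _
  unfold Spec_labels2vec labels2vec labels2vec_alt toxicityLabels
  simp only [List.foldl_cons, List.foldl_nil, List.length_cons, List.length_nil,
             List.replicate]
  rw [pvFold_mark]
  split_ifs <;> simp_all
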